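-- pv_equiv track=rewrite | github.com/RenDawn777/PythonMusicGenerator | main.py | findMiddleNote
-- ===== SOURCE A (Python) =====
-- def findMiddleNote(Key,a,b):
--     index = 0
--     solution = 'none'
--     for note in Key:
--         if note == a:
--             if index+2 < len(Key) and Key[index+2] == b:
--                 solution = Key[index+1]
--         if note == b:
--             if index+2 < len(Key) and Key[index+2] == a:
--                 solution = Key[index+1]
--         index+=1
--     return solution
-- ===== SOURCE B (Python) =====
-- def findMiddleNote(Key, a, b):
--     # Occurrence-index algorithm: collect the positions of a and of b once,
--     # then join the two position lists on "two apart", keeping the largest index.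
--     pa = [i for i, note in enumerate(Key) if note == a]
--     pb = [i for i, note in enumerate(Key) if note == b]
--     best = -1
--     for i in pa:
--         if i + 2 in pb and i > best:
--             best = i
--     for i in pb:
--         if i + 2 in pa and i > best:
--             best = i
--     return Key[best + 1] if best >= 0 else 'none'
-- ===== Notes on version B (the rewrite author's own statement) =====
-- stated objective: alternative
-- what changed: Instead of sliding a 3-window over Key with a last-match accumulator, B first builds the occurrence-position lists of a and of b, then joins the two lists on the relation 'two indices apart' while tracking the largest matching index, and finally indexes Key once.
import Mathlib
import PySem

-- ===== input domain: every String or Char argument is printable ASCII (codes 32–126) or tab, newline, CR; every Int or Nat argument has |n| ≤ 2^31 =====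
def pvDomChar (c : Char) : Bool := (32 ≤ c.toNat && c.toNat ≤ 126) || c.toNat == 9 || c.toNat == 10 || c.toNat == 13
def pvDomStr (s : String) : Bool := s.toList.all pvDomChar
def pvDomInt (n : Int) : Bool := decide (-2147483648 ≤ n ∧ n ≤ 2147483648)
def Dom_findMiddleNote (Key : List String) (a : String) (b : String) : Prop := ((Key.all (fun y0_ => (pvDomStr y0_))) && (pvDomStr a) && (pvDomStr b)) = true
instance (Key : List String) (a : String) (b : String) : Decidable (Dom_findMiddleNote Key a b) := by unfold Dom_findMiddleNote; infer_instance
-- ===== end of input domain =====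

-- B replaces A's sliding-window last-match scan by an occurrence-index join: it collects
-- the position lists of a and of b, joins them on 'two apart' keeping the largest index,
-- and indexes Key once; objective: alternative.

-- ===== PORT A =====
-- A's loop over Key with the running index and the 'solution' accumulator.
-- Python's Key[index+2] / Key[index+1] are only evaluated under the guard
-- index+2 < len(Key), so the in-range access equals List.getD (default unreachable).
def goA (Key : List String) (a : String) (b : String) : List String → Nat → String → String
  | [], _, sol => sol
  | note :: rest, i, sol =>
    let sol1 := if note = a ∧ i + 2 < Key.length ∧ Key.getD (i + 2) "" = b then Key.getD (i + 1) "" else sol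
    let sol2 := if note = b ∧ i + 2 < Key.length ∧ Key.getD (i + 2) "" = a then Key.getD (i + 1) "" else sol1
    goA Key a b rest (i + 1) sol2

def findMiddleNote (Key : List String) (a : String) (b : String) : String :=
  goA Key a b Key 0 "none"

-- ===== PORT B =====
-- B's position-list comprehension '[i for i, note in enumerate(Key) if note == x]',
-- as a recursion carrying the enumerate counter.
def posOf (x : String) : List String → Nat → List Int
  | [], _ => []
  | note :: rest, i => (if note = x then [(i : Int)] else []) ++ posOf x rest (i + 1)

-- B's 'for i in xs: if i + 2 in other and i > best: best = i' loop.
def bestFold (other : List Int) : List Int → Int → Int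
  | [], best => best
  | i :: rest, best => bestFold other rest (if (i + 2) ∈ other ∧ best < i then i else best)

def findMiddleNote_alt (Key : List String) (a : String) (b : String) : String :=
  let pa := posOf a Key 0
  let pb := posOf b Key 0
  let best := bestFold pa pb (bestFold pb pa (-1))
  if 0 ≤ best then (PySem.List.pyGet? Key (best + 1)).getD "" else "none"

-- ===== PRECONDITION & SPEC =====
def Spec_findMiddleNote (Key : List String) (a : String) (b : String) (out : String) : Prop := out = findMiddleNote_alt Key a b
instance (Key : List String) (a : String) (b : String) (out : String) : Decidable (Spec_findMiddleNote Key a b out) := by unfold Spec_findMiddleNote; infer_instance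

-- ===== CLAIM (what is proved, stated in full; the proofs are below) =====
def Claim_equal_findMiddleNote : Prop := ∀ (Key : List String) (a : String) (b : String), Dom_findMiddleNote Key a b → Spec_findMiddleNote Key a b (findMiddleNote Key a b)

-- ===== LEMMAS AND PROOFS =====

-- the combined match condition at index j (both of A's branches write the same value)
abbrev cnd (Key : List String) (a : String) (b : String) (j : Nat) : Prop :=
  j + 2 < Key.length ∧
    ((Key.getD j "" = a ∧ Key.getD (j + 2) "" = b) ∨ (Key.getD j "" = b ∧ Key.getD (j + 2) "" = a))

-- down Key a b i c sol scans indices i+c-1, …, i (top-down), falling back to sol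
def down (Key : List String) (a : String) (b : String) (i : Nat) : Nat → String → String
  | 0, sol => sol
  | c + 1, sol => if cnd Key a b (i + c) then Key.getD (i + c + 1) "" else down Key a b i c sol

lemma down_peel_bot (Key : List String) (a b : String) :
    ∀ (c i : Nat) (sol : String),
      down Key a b i (c + 1) sol
        = down Key a b (i + 1) c (if cnd Key a b i then Key.getD (i + 1) "" else sol) := by
  intro c
  induction c with
  | zero => intro i sol; simp [down]
  | succ c ih =>
    intro i sol
    show (if cnd Key a b (i + (c+1)) then Key.getD (i + (c+1) + 1) "" else down Key a b i (c+1) sol) = _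
    rw [ih i sol]
    have h2 : i + (c + 1) = (i + 1) + c := by omega
    simp [down, h2]

lemma goA_eq_down (Key : List String) (a b : String) :
    ∀ (c i : Nat) (sol : String), c = Key.length - i → i ≤ Key.length →
      goA Key a b (Key.drop i) i sol = down Key a b i c sol := by
  intro c
  induction c with
  | zero =>
    intro i sol hc hi
    have : i = Key.length := by omega
    subst this
    simp [goA, down, List.drop_length]
  | succ c ih =>
    intro i sol hc hi
    have hlt : i < Key.length := by omega
    rw [List.drop_eq_getElem_cons hlt]
    show goA Key a b (Key[i] :: Key.drop (i+1)) i sol = _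
    rw [down_peel_bot]
    have hkey : Key[i] = Key.getD i "" := by
      simp [List.getD_eq_getElem?_getD, List.getElem?_eq_getElem hlt]
    rw [goA]
    have := ih (i + 1) (if Key[i] = b ∧ i + 2 < Key.length ∧ Key.getD (i + 2) "" = a
        then Key.getD (i + 1) ""
        else if Key[i] = a ∧ i + 2 < Key.length ∧ Key.getD (i + 2) "" = b
        then Key.getD (i + 1) "" else sol) (by omega) (by omega)
    simp only [] at this ⊢
    rw [this]
    congr 1
    rw [hkey]
    simp only [cnd]
    split_ifs with h1 h2 h3 h4 h5 <;> try rfl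
    all_goals tauto

-- down returns sol when no index below c matches
lemma down_none (Key : List String) (a b : String) :
    ∀ (c : Nat) (sol : String), (∀ j, j < c → ¬ cnd Key a b j) → down Key a b 0 c sol = sol := by
  intro c
  induction c with
  | zero => intro sol _; rfl
  | succ c ih =>
    intro sol h
    show (if cnd Key a b (0 + c) then _ else down Key a b 0 c sol) = sol
    rw [if_neg (by simpa using h c (by omega))]
    exact ih sol (fun j hj => h j (by omega))

-- down returns the middle note of the LARGEST matching index below c
lemma down_best (Key : List String) (a b : String) :
    ∀ (c : Nat) (m : Nat) (sol : String), cnd Key a b m → m < c →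
      (∀ j, cnd Key a b j → j < c → j ≤ m) →
      down Key a b 0 c sol = Key.getD (m + 1) "" := by
  intro c
  induction c with
  | zero => intro m sol _ hm _; omega
  | succ c ih =>
    intro m sol hcnd hm hmax
    show (if cnd Key a b (0 + c) then Key.getD (0 + c + 1) "" else down Key a b 0 c sol) = _
    by_cases hc : cnd Key a b c
    · have : m = c := by
        have := hmax c (by simpa using hc) (by omega)
        omega
      subst this
      rw [if_pos (by simpa using hc)]
      simp
    · rw [if_neg (by simpa using hc)]
      have hm' : m < c := by
        rcases Nat.lt_succ_iff_lt_or_eq.mp hm with h | h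
        · exact h
        · exact absurd (h ▸ hcnd) hc
      exact ih m sol hcnd hm' (fun j hj hjc => hmax j hj (by omega))

-- membership in a position list
lemma mem_posOf (x : String) :
    ∀ (L : List String) (i : Nat) (k : Int),
      k ∈ posOf x L i ↔ ∃ j : Nat, j < L.length ∧ L.getD j "" = x ∧ k = ((i + j : Nat) : Int) := by
  intro L
  induction L with
  | nil => intro i k; simp [posOf]
  | cons note rest ih =>
    intro i k
    simp only [posOf, List.mem_append]
    constructor
    · intro h
      rcases h with h | h
      · split_ifs at h with hn
        · refine ⟨0, by simp, by simpa [List.getD] using hn, by simpa using h⟩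
        · simp at h
      · rcases (ih (i + 1) k).mp h with ⟨j, hj, hg, hk⟩
        exact ⟨j + 1, by simpa using hj, by simpa [List.getD] using hg, by omega⟩
    · rintro ⟨j, hj, hg, hk⟩
      cases j with
      | zero =>
        left
        simp only [List.getD] at hg
        simp at hg
        simp [hg, hk]
      | succ j =>
        right
        refine (ih (i + 1) k).mpr ⟨j, by simpa using hj, by simpa [List.getD] using hg, by omega⟩

-- bestFold never decreases the accumulator
lemma bestFold_ge (other : List Int) :
    ∀ (xs : List Int) (acc : Int), acc ≤ bestFold other xs acc := by
  intro xs
  induction xs with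
  | nil => intro acc; simp [bestFold]
  | cons i rest ih =>
    intro acc
    show acc ≤ bestFold other rest (if (i + 2) ∈ other ∧ acc < i then i else acc)
    split_ifs with h
    · exact le_trans (le_of_lt h.2) (ih i)
    · exact ih acc

-- bestFold's result is the accumulator or a matching element of xs
lemma bestFold_cases (other : List Int) :
    ∀ (xs : List Int) (acc : Int),
      bestFold other xs acc = acc ∨
        (bestFold other xs acc ∈ xs ∧ (bestFold other xs acc + 2) ∈ other) := by
  intro xs
  induction xs with
  | nil => intro acc; left; rfl
  | cons i rest ih =>
    intro acc
    simp only [bestFold]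
    split_ifs with h
    · rcases ih i with h1 | h1
      · right; rw [h1]; exact ⟨List.mem_cons_self .., h1 ▸ h.1⟩
      · right; exact ⟨List.mem_cons_of_mem _ h1.1, h1.2⟩
    · rcases ih acc with h1 | h1
      · left; exact h1
      · right; exact ⟨List.mem_cons_of_mem _ h1.1, h1.2⟩

-- every matching element of xs is a lower bound on the result
lemma bestFold_le (other : List Int) :
    ∀ (xs : List Int) (acc i : Int), i ∈ xs → (i + 2) ∈ other → i ≤ bestFold other xs acc := by
  intro xs
  induction xs with
  | nil => intro acc i h _; simp at h
  | cons x rest ih =>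
    intro acc i hmem hoth
    show i ≤ bestFold other rest (if (x + 2) ∈ other ∧ acc < x then x else acc)
    rcases List.mem_cons.mp hmem with rfl | h
    · split_ifs with h
      · exact le_trans (le_refl i) (bestFold_ge other rest i)
      · have : i ≤ acc := by
          by_contra hc
          exact h ⟨hoth, by omega⟩
        exact le_trans this (bestFold_ge other rest acc)
    · exact ih _ i h hoth

-- ===== VERDICT (by name: the statement is the Claim_ definition above) =====
theorem findMiddleNote_spec : Claim_equal_findMiddleNote := by
  unfold Claim_equal_findMiddleNote
  intro Key a b _
  unfold Spec_findMiddleNote findMiddleNote findMiddleNote_alt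
  simp only []
  set pa := posOf a Key 0 with hpa
  set pb := posOf b Key 0 with hpb
  set best := bestFold pa pb (bestFold pb pa (-1)) with hbest
  have hmem_pa : ∀ k : Int, k ∈ pa ↔ ∃ j : Nat, j < Key.length ∧ Key.getD j "" = a ∧ k = (j : Int) := by
    intro k; rw [hpa, mem_posOf]; simp
  have hmem_pb : ∀ k : Int, k ∈ pb ↔ ∃ j : Nat, j < Key.length ∧ Key.getD j "" = b ∧ k = (j : Int) := by
    intro k; rw [hpb, mem_posOf]; simp
  -- every matching index is ≤ best
  have hub : ∀ j : Nat, cnd Key a b j → (j : Int) ≤ best := by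
    intro j ⟨hlen, hj⟩
    rcases hj with ⟨ha, hb⟩ | ⟨hb, ha⟩
    · have h1 : (j : Int) ∈ pa := (hmem_pa _).mpr ⟨j, by omega, ha, rfl⟩
      have h2 : ((j : Int) + 2) ∈ pb := (hmem_pb _).mpr ⟨j + 2, by omega, hb, by push_cast; ring⟩
      exact le_trans (bestFold_le pb pa (-1) _ h1 h2) (bestFold_ge pa pb _)
    · have h1 : (j : Int) ∈ pb := (hmem_pb _).mpr ⟨j, by omega, hb, rfl⟩
      have h2 : ((j : Int) + 2) ∈ pa := (hmem_pa _).mpr ⟨j + 2, by omega, ha, by push_cast; ring⟩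
      exact bestFold_le pa pb _ _ h1 h2
  -- best is -1 or a matching index
  have hcases : best = -1 ∨ ∃ m : Nat, best = (m : Int) ∧ cnd Key a b m := by
    have hmk : ∀ k : Int, k ∈ pb → (k + 2) ∈ pa → ∃ m : Nat, k = (m : Int) ∧ cnd Key a b m := by
      intro k h1 h2
      rcases (hmem_pb _).mp h1 with ⟨j, hj, hg, rfl⟩
      rcases (hmem_pa _).mp h2 with ⟨j2, hj2, hg2, he⟩
      have : j2 = j + 2 := by omega
      subst this
      exact ⟨j, rfl, ⟨by omega, Or.inr ⟨hg, hg2⟩⟩⟩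
    have hmk' : ∀ k : Int, k ∈ pa → (k + 2) ∈ pb → ∃ m : Nat, k = (m : Int) ∧ cnd Key a b m := by
      intro k h1 h2
      rcases (hmem_pa _).mp h1 with ⟨j, hj, hg, rfl⟩
      rcases (hmem_pb _).mp h2 with ⟨j2, hj2, hg2, he⟩
      have : j2 = j + 2 := by omega
      subst this
      exact ⟨j, rfl, ⟨by omega, Or.inl ⟨hg, hg2⟩⟩⟩
    rcases bestFold_cases pa pb (bestFold pb pa (-1)) with h | h
    · rcases bestFold_cases pb pa (-1) with h2 | h2
      · left; rw [hbest, h, h2]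
      · right
        rcases hmk' _ h2.1 h2.2 with ⟨m, hm, hc⟩
        exact ⟨m, by rw [hbest, h, hm], hc⟩
    · right
      rcases hmk _ h.1 h.2 with ⟨m, hm, hc⟩
      exact ⟨m, hm, hc⟩
  -- A's side rewritten as 'down'
  have hA : goA Key a b Key 0 "none" = down Key a b 0 Key.length "none" := by
    have := goA_eq_down Key a b Key.length 0 "none" (by omega) (by omega)
    simpa using this
  rw [hA]
  rcases hcases with hnone | ⟨m, hm, hc⟩
  · rw [if_neg (by omega)]
    apply down_none
    intro j _ hj
    have := hub j hj
    omega
  · have hpos : (0 : Int) ≤ best := by omega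
    rw [if_pos hpos]
    have hget : (PySem.List.pyGet? Key (best + 1)).getD "" = Key.getD (m + 1) "" := by
      have hlt : m + 1 < Key.length := by
        have := hc.1; omega
      have : best + 1 = ((m + 1 : Nat) : Int) := by omega
      rw [this, PySem.List.pyGet?_natCast]
      simp [List.getD_eq_getElem?_getD, List.getElem?_eq_getElem hlt]
    rw [hget]
    exact down_best Key a b Key.length m "none" hc (by have := hc.1; omega)
      (fun j hj _ => by have := hub j hj; omega)
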